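-- pv_equiv track=rewrite | github.com/AlliedToasters/fpwap | src/fpwap/engine.py | _has_attention_mask
-- ===== SOURCE A (Python) =====
-- from typing import Any, Literal, cast
--
-- def _has_attention_mask(items: list[Any]) -> bool:
--     """All-or-nothing contract: every item carries an attention_mask, or none do.
--
--     Mixed datasets silently drop the mask on items that don't declare one, which
--     would make padded-batch correctness a subtle footgun.
--     """
--     present = ["attention_mask" in item for item in items]
--     if all(present):
--         return True
--     if any(present):
--         raise ValueError(
--             "dataset items are inconsistent: some have attention_mask and others "
--             "don't. Either include attention_mask on every item or omit it from "
--             "all of them."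
--         )
--     return False
-- ===== SOURCE B (Python) =====
-- def _has_attention_mask(items: list) -> bool:
--     """Single fused pass: two flags, early ValueError on inconsistency."""
--     any_present = False
--     any_absent = False
--     for item in items:
--         if "attention_mask" in item:
--             any_present = True
--         else:
--             any_absent = True
--         if any_present and any_absent:
--             raise ValueError(
--                 "dataset items are inconsistent: some have attention_mask and others "
--                 "don't. Either include attention_mask on every item or omit it from "
--                 "all of them."
--             )
--     return not any_absent
-- ===== Notes on version B (the rewrite author's own statement) =====
-- stated objective: simpler
-- what changed: Replaced the materialized boolean list plus separate all()/any() reductions with one fused loop maintaining two flags (any_present/any_absent) that raises the same ValueError as soon as inconsistency is seen and returns not any_absent.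
import Mathlib
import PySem

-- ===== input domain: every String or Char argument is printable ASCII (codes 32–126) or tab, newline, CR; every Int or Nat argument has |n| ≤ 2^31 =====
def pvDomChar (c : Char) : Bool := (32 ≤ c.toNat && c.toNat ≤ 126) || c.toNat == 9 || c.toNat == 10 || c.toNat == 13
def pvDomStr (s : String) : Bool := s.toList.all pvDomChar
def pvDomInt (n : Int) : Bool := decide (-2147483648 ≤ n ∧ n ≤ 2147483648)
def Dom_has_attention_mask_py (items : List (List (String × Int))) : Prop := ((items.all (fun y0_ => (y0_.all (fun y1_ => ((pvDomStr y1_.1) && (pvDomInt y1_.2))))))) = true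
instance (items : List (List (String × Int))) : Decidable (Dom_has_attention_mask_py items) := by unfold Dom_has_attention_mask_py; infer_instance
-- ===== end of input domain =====

-- B fuses A's list comprehension + all()/any() into one loop with two flags and an early raise; objective: simpler.
-- Both programs raise the same ValueError on mixed lists; those inputs are outside Pre_.

-- ===== PORT A =====
-- '"attention_mask" in item' for a dict item = key membership in the association list
def pvHasMask (item : List (String × Int)) : Bool := item.any (fun kv => kv.1 == "attention_mask")

def has_attention_mask_py (items : List (List (String × Int))) : Bool :=
  let present := items.map pvHasMask
  if present.all id then true
  else if present.any id then false  -- raise ValueError (mixed); excluded by Pre_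
  else false

-- ===== PORT B =====
def pvAltLoop (items : List (List (String × Int))) (anyPresent anyAbsent : Bool) : Bool :=
  match items with
  | [] => !anyAbsent
  | item :: rest =>
    let anyPresent := if pvHasMask item then true else anyPresent
    let anyAbsent := if pvHasMask item then anyAbsent else true
    if anyPresent && anyAbsent then false  -- raise ValueError; excluded by Pre_
    else pvAltLoop rest anyPresent anyAbsent

def has_attention_mask_py_alt (items : List (List (String × Int))) : Bool :=
  pvAltLoop items false false

-- ===== PRECONDITION & SPEC =====
-- Pre_ excludes exactly the mixed lists, on which both A and B raise ValueError.
def Pre_has_attention_mask_py (items : List (List (String × Int))) : Prop :=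
  (∀ it ∈ items, pvHasMask it = true) ∨ (∀ it ∈ items, pvHasMask it = false)
instance (items : List (List (String × Int))) : Decidable (Pre_has_attention_mask_py items) := by unfold Pre_has_attention_mask_py; infer_instance
def pvWitness_has_attention_mask_py : (List (List (String × Int))) := [[("attention_mask", 1)], [("attention_mask", 0), ("x", 3)]]

def Spec_has_attention_mask_py (items : List (List (String × Int))) (out : Bool) : Prop := out = has_attention_mask_py_alt items
instance (items : List (List (String × Int))) (out : Bool) : Decidable (Spec_has_attention_mask_py items out) := by unfold Spec_has_attention_mask_py; infer_instance

-- ===== CLAIM (what is proved, stated in full; the proofs are below) =====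
def Claim_equal_has_attention_mask_py : Prop := ∀ (items : List (List (String × Int))), Dom_has_attention_mask_py items → Pre_has_attention_mask_py items → Spec_has_attention_mask_py items (has_attention_mask_py items)

-- ===== LEMMAS AND PROOFS =====
theorem pvAltLoop_all_present (items : List (List (String × Int))) (p : Bool)
    (h : ∀ it ∈ items, pvHasMask it = true) : pvAltLoop items p false = true := by
  induction items generalizing p with
  | nil => rfl
  | cons it rest ih =>
    have hit := h it (List.mem_cons_self)
    simp [pvAltLoop, hit]
    exact ih true (fun x hx => h x (List.mem_cons_of_mem _ hx))

theorem pvAltLoop_all_absent (items : List (List (String × Int))) (a : Bool)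
    (h : ∀ it ∈ items, pvHasMask it = false) : pvAltLoop items false a = (items.isEmpty && !a) := by
  induction items generalizing a with
  | nil => simp [pvAltLoop]
  | cons it rest ih =>
    have hit := h it (List.mem_cons_self)
    simp [pvAltLoop, hit]
    rw [ih true (fun x hx => h x (List.mem_cons_of_mem _ hx))]
    simp

-- ===== VERDICT (by name: the statement is the Claim_ definition above) =====
theorem has_attention_mask_py_spec : Claim_equal_has_attention_mask_py := by
  intro items _ hpre
  unfold Spec_has_attention_mask_py has_attention_mask_py has_attention_mask_py_alt
  rcases hpre with h | h
  · rw [pvAltLoop_all_present items false h]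
    simp [List.all_map, List.all_eq_true]
    intro x hx
    exact h x hx
  · rw [pvAltLoop_all_absent items false h]
    cases items with
    | nil => simp
    | cons it rest =>
      have hit := h it (List.mem_cons_self)
      simp [List.any_eq_true, hit]
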